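-- pv_equiv track=rewrite | github.com/syz51/fundamental-analysis-system | docs/design-flaws/generate_index.py | categorize_flaws
-- ===== SOURCE A (Python) =====
-- def categorize_flaws(flaws):
--     """Categorize flaws by status and priority."""
--     active = [f for f in flaws if f["status"] == "active"]
--     resolved = [f for f in flaws if f["status"] == "resolved"]
--     future = [f for f in flaws if f["status"] == "future"]
--
--     # Further categorize active by priority
--     critical = [f for f in active if f["priority"] == "critical"]
--     high = [f for f in active if f["priority"] == "high"]
--     medium = [f for f in active if f["priority"] == "medium"]
--     low = [f for f in active if f["priority"] == "low"]
--
--     return {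
--         "active": active,
--         "resolved": resolved,
--         "future": future,
--         "critical": critical,
--         "high": high,
--         "medium": medium,
--         "low": low,
--     }
-- ===== SOURCE B (Python) =====
-- def categorize_flaws(flaws):
--     """Categorize flaws by status and priority in a single pass."""
--     active, resolved, future = [], [], []
--     critical, high, medium, low = [], [], [], []
--     for f in flaws:
--         s = f["status"]
--         if s == "active":
--             active.append(f)
--             p = f["priority"]
--             if p == "critical":
--                 critical.append(f)
--             elif p == "high":
--                 high.append(f)
--             elif p == "medium":
--                 medium.append(f)
--             elif p == "low":
--                 low.append(f)
--         elif s == "resolved":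
--             resolved.append(f)
--         elif s == "future":
--             future.append(f)
--     return {
--         "active": active,
--         "resolved": resolved,
--         "future": future,
--         "critical": critical,
--         "high": high,
--         "medium": medium,
--         "low": low,
--     }
-- ===== Notes on version B (the rewrite author's own statement) =====
-- stated objective: faster
-- what changed: B replaces A's seven independent list-comprehension passes over the data with a single loop that dispatches each flaw by status (and, for active flaws, by priority) into seven accumulator lists.
-- outside the precondition, e.g. on categorize_flaws([{'priority': 'high'}]): A raises KeyError, B raises KeyError
import Mathlib
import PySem

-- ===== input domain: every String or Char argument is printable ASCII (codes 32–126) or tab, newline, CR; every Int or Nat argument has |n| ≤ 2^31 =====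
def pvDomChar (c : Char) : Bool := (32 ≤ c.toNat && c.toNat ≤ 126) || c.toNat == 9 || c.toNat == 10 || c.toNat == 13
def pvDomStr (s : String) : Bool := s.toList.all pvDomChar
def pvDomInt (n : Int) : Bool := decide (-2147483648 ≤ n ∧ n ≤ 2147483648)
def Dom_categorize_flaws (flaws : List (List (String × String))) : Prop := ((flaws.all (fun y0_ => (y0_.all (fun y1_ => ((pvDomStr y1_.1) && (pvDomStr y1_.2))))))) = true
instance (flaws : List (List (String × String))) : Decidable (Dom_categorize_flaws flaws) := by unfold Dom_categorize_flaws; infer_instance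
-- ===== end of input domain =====

-- B buckets the flaws in one pass with seven accumulator lists instead of A's seven comprehension passes; return values agree wherever A returns.

-- first-match association lookup = Python d[k] (some v) / KeyError (none)
def pvLookup (f : List (String × String)) (k : String) : Option String :=
  (f.find? (fun kv => kv.1 == k)).map (·.2)

-- the d[k] == v test shared by both ports
def pvIs (f : List (String × String)) (k v : String) : Bool :=
  pvLookup f k == some v

-- ===== PORT A =====
def categorize_flaws (flaws : List (List (String × String))) : List (String × List (List (String × String))) :=
  let active := flaws.filter (fun f => pvIs f "status" "active")
  let resolved := flaws.filter (fun f => pvIs f "status" "resolved")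
  let future := flaws.filter (fun f => pvIs f "status" "future")
  let critical := active.filter (fun f => pvIs f "priority" "critical")
  let high := active.filter (fun f => pvIs f "priority" "high")
  let medium := active.filter (fun f => pvIs f "priority" "medium")
  let low := active.filter (fun f => pvIs f "priority" "low")
  [("active", active), ("resolved", resolved), ("future", future),
   ("critical", critical), ("high", high), ("medium", medium), ("low", low)]

-- ===== PORT B =====
-- a flaw record and the state of Source B's loop (the seven accumulator lists)
abbrev PvFlaw := List (String × String)
abbrev PvSt :=
  List PvFlaw × List PvFlaw × List PvFlaw × List PvFlaw × List PvFlaw × List PvFlaw × List PvFlaw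

-- loop body of Source B: dispatch one flaw into the accumulators
def pvStep (st : PvSt) (f : PvFlaw) : PvSt :=
  let (a, r, fu, c, h, m, l) := st
  if pvIs f "status" "active" then
    ( a ++ [f], r, fu,
      if pvIs f "priority" "critical" then c ++ [f] else c,
      if pvIs f "priority" "high" then h ++ [f] else h,
      if pvIs f "priority" "medium" then m ++ [f] else m,
      if pvIs f "priority" "low" then l ++ [f] else l )
  else if pvIs f "status" "resolved" then (a, r ++ [f], fu, c, h, m, l)
  else if pvIs f "status" "future" then (a, r, fu ++ [f], c, h, m, l)
  else (a, r, fu, c, h, m, l)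

def categorize_flaws_alt (flaws : List (List (String × String))) : List (String × List (List (String × String))) :=
  let (a, r, fu, c, h, m, l) := flaws.foldl pvStep ([], [], [], [], [], [], [])
  [("active", a), ("resolved", r), ("future", fu),
   ("critical", c), ("high", h), ("medium", m), ("low", l)]

-- ===== PRECONDITION & SPEC =====
-- Pre_ excludes exactly the inputs where the Python A raises KeyError: a flaw without a
-- "status" key, or an active flaw without a "priority" key.
def Pre_categorize_flaws (flaws : List (List (String × String))) : Prop :=
  (flaws.all (fun f =>
    (pvLookup f "status").isSome &&
    (!(pvIs f "status" "active") || (pvLookup f "priority").isSome))) = true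
instance (flaws : List (List (String × String))) : Decidable (Pre_categorize_flaws flaws) := by
  unfold Pre_categorize_flaws; infer_instance

def pvWitness_categorize_flaws : (List (List (String × String))) :=
  [[("status", "active"), ("priority", "high")], [("status", "resolved")]]

def Spec_categorize_flaws (flaws : List (List (String × String))) (out : List (String × List (List (String × String)))) : Prop := out = categorize_flaws_alt flaws
instance (flaws : List (List (String × String))) (out : List (String × List (List (String × String)))) : Decidable (Spec_categorize_flaws flaws out) := by unfold Spec_categorize_flaws; infer_instance

-- ===== CLAIM (what is proved, stated in full; the proofs are below) =====
def Claim_equal_categorize_flaws : Prop := ∀ (flaws : List (List (String × String))), Dom_categorize_flaws flaws → Pre_categorize_flaws flaws → Spec_categorize_flaws flaws (categorize_flaws flaws)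

-- ===== LEMMAS AND PROOFS =====

-- the fold computes each accumulator followed by the corresponding filter of A
lemma pv_foldl_step (fs : List PvFlaw) :
    ∀ (a r fu c h m l : List PvFlaw),
    fs.foldl pvStep (a, r, fu, c, h, m, l) =
      ( a ++ fs.filter (fun f => pvIs f "status" "active"),
        r ++ fs.filter (fun f => pvIs f "status" "resolved"),
        fu ++ fs.filter (fun f => pvIs f "status" "future"),
        c ++ (fs.filter (fun f => pvIs f "status" "active")).filter (fun f => pvIs f "priority" "critical"),
        h ++ (fs.filter (fun f => pvIs f "status" "active")).filter (fun f => pvIs f "priority" "high"),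
        m ++ (fs.filter (fun f => pvIs f "status" "active")).filter (fun f => pvIs f "priority" "medium"),
        l ++ (fs.filter (fun f => pvIs f "status" "active")).filter (fun f => pvIs f "priority" "low") ) := by
  induction fs with
  | nil => intro a r fu c h m l; simp
  | cons f fs ih =>
    intro a r fu c h m l
    by_cases hA : pvIs f "status" "active"
    · have hR : pvIs f "status" "resolved" = false := by
        simp only [pvIs, beq_iff_eq] at hA ⊢; simp [hA]
      have hF : pvIs f "status" "future" = false := by
        simp only [pvIs, beq_iff_eq] at hA ⊢; simp [hA]
      simp [pvStep, hA, hR, hF, ih, List.filter_cons]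
      split_ifs <;> simp_all
    · simp only [Bool.not_eq_true] at hA
      by_cases hR : pvIs f "status" "resolved"
      · have hF : pvIs f "status" "future" = false := by
          simp only [pvIs, beq_iff_eq] at hR ⊢; simp [hR]
        simp [pvStep, hA, hR, hF, ih]
      · simp only [Bool.not_eq_true] at hR
        by_cases hF : pvIs f "status" "future"
        · simp [pvStep, hA, hR, hF, ih]
        · simp only [Bool.not_eq_true] at hF
          simp [pvStep, hA, hR, hF, ih]

-- ===== VERDICT (by name: the statement is the Claim_ definition above) =====
theorem categorize_flaws_spec : Claim_equal_categorize_flaws := by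
  intro flaws _ _
  show categorize_flaws flaws = categorize_flaws_alt flaws
  simp only [categorize_flaws, categorize_flaws_alt, pv_foldl_step, List.nil_append]
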